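-- pv_equiv track=rewrite | github.com/carolinaaaaa7/ATP2022 | obras22.py | titulo_por_ano
-- ===== SOURCE A (Python) =====
-- def titulo_por_ano (lista):
--     res = {}
--     for nome,_,ano, *_ in lista:
--         if ano in res.keys():
--             res[ano].append(nome)
--         else:
--             res[ano] = [nome]
--     res= dict(sorted (res.items()))
--     return res
-- ===== SOURCE B (Python) =====
-- def titulo_por_ano(lista):
--     pares = []
--     for nome, _, ano, *_ in lista:
--         pares.append((ano, nome))
--     pares.sort(key=lambda e: e[0])
--     res = {}
--     for ano, nome in pares:
--         res.setdefault(ano, []).append(nome)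
--     return res
-- ===== Notes on version B (the rewrite author's own statement) =====
-- stated objective: alternative
-- what changed: A builds the dict with a per-row membership branch (append vs create) and sorts the items afterwards; B flattens the rows to (year, name) pairs, stably sorts the pairs by year, and groups them in one branch-free setdefault pass, so the dict comes out already in key order.
import Mathlib
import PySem

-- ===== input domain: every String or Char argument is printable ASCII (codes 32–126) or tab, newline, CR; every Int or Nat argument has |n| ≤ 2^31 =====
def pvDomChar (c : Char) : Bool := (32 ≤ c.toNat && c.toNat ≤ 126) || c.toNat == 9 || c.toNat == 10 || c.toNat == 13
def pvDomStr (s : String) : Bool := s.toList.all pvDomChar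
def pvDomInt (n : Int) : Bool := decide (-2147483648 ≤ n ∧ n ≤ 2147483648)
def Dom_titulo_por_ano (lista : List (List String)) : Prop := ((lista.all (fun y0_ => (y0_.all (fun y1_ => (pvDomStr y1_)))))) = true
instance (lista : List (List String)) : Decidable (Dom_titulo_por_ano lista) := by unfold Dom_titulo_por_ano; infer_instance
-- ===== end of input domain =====

-- B replaces A's dict-building loop with a membership branch by: flatten to (year, name)
-- pairs, stably sort the pairs by year, then group in one branch-free pass (setdefault);
-- objective: alternative (same task, different decomposition).

-- ===== PORT A =====
-- `sorted(res.items())` compares (key, value) tuples; the dict's keys are distinct, so the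
-- comparison is decided by the key alone: ported as sorting the items by their first component.
def titulo_por_ano (lista : List (List String)) : List (String × List String) :=
  let res : PySem.Dict String (List String) :=
    lista.foldl (fun res row =>
      match row with
      | nome :: _ :: ano :: _ =>
        -- `ano in res.keys()` / `res[ano].append(nome)` (in-place append) / `res[ano] = [nome]`
        if res.contains ano then res.modify ano [] (fun v => v ++ [nome])
        else res.insert ano [nome]
      | _ => res) PySem.Dict.empty   -- rows shorter than 3 raise ValueError: excluded by Pre_
  PySem.List.sorted res.items (fun p => p.1) false

-- ===== PORT B =====
def titulo_por_ano_alt (lista : List (List String)) : List (String × List String) :=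
  let pares : List (String × String) :=
    -- `nome,_,ano,*_ = row` reads positions 0 and 2; rows shorter than 3 raise
    -- ValueError and are excluded by Pre_ (the "" defaults are never reached there)
    lista.map (fun row => (row.getD 2 "", row.getD 0 ""))
  let pares := PySem.List.sorted pares (fun e => e.1) false
  -- `res.setdefault(ano, []).append(nome)` is exactly `res[ano] = res.get(ano, []) + [nome]`
  (pares.foldl (fun (res : PySem.Dict String (List String)) e =>
      res.modify e.1 [] (fun v => v ++ [e.2])) PySem.Dict.empty).items

-- ===== PRECONDITION & SPEC =====
-- Pre_ excludes exactly the inputs on which A raises: a row with fewer than 3 elements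
-- makes the unpacking `nome,_,ano,*_` raise ValueError (B raises there too).
def Pre_titulo_por_ano (lista : List (List String)) : Prop :=
  ∀ row ∈ lista, 3 ≤ row.length
instance (lista : List (List String)) : Decidable (Pre_titulo_por_ano lista) := by
  unfold Pre_titulo_por_ano; infer_instance

def pvWitness_titulo_por_ano : List (List String) :=
  [["a", "x", "2000"], ["b", "y", "1999"], ["c", "z", "2000", "extra"]]

def Spec_titulo_por_ano (lista : List (List String)) (out : List (String × List String)) : Prop := out = titulo_por_ano_alt lista
instance (lista : List (List String)) (out : List (String × List String)) : Decidable (Spec_titulo_por_ano lista out) := by unfold Spec_titulo_por_ano; infer_instance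

-- ===== CLAIM (what is proved, stated in full; the proofs are below) =====
def Claim_equal_titulo_por_ano : Prop := ∀ (lista : List (List String)), Dom_titulo_por_ano lista → Pre_titulo_por_ano lista → Spec_titulo_por_ano lista (titulo_por_ano lista)

-- ===== LEMMAS AND PROOFS =====

-- abbreviations used only by the proofs
def pvToPair (row : List String) : String × String := (row.getD 2 "", row.getD 0 "")

def pvStep (d : PySem.Dict String (List String)) (p : String × String) :
    PySem.Dict String (List String) :=
  d.modify p.1 [] (fun v => v ++ [p.2])

def pvG (ps : List (String × String)) : PySem.Dict String (List String) :=
  ps.foldl pvStep PySem.Dict.empty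

def pvItems (ps : List (String × String)) : List (String × List String) :=
  (PySem.Set.ofList (ps.map (fun p => p.1))).map
    (fun k => (k, (ps.filter (fun p => p.1 == k)).map (fun p => p.2)))

-- A's branch is exactly one `modify`
lemma pv_branch_eq_modify (d : PySem.Dict String (List String)) (k v : String) :
    (if d.contains k then d.modify k [] (fun w => w ++ [v]) else d.insert k [v]) =
      d.modify k [] (fun w => w ++ [v]) := by
  by_cases h : d.contains k
  · simp [h]
  · simp only [Bool.not_eq_true] at h
    simp [h, PySem.Dict.modify, PySem.Dict.getD_of_not_contains _ _ h]

lemma pvG_items (ps : List (String × String)) : (pvG ps).items = pvItems ps := by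
  have hkeys : (pvG ps).keys = PySem.Set.ofList (ps.map (fun p => p.1)) := by
    have := PySem.Dict.keys_foldl_modify_key ps (fun p => p.1)
      ([] : List String) (fun _ p v => v ++ [p.2]) PySem.Dict.empty
    simpa [pvG, pvStep, PySem.Set.update, PySem.Set.ofList_eq_foldl] using this
  have hnd : (pvG ps).keys.Nodup := by
    rw [hkeys]; exact PySem.Set.nodup_ofList _
  have hval : ∀ k, (pvG ps).getD k [] = (ps.filter (fun p => p.1 == k)).map (fun p => p.2) := by
    intro k
    have := PySem.Dict.getD_foldl_modify_append ps PySem.Dict.empty k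
    simpa [pvG, pvStep] using this
  rw [PySem.Dict.items_eq_map_keys _ hnd ([] : List String), hkeys, pvItems]
  exact List.map_congr_left (fun k _ => by rw [hval k])

-- ---- stability of PySem.List.sorted for the key (·.1) ----

lemma pv_insertBy_pairwise (x : String × String) (ys : List (String × String))
    (h : ys.Pairwise (fun a b => a.1 ≤ b.1)) :
    (PySem.List.insertBy (fun a b => decide (a.1 < b.1)) x ys).Pairwise
      (fun a b => a.1 ≤ b.1) := by
  induction ys with
  | nil => simp [PySem.List.insertBy]
  | cons y ys ih =>
    rw [List.pairwise_cons] at h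
    by_cases hb : y.1 ≤ x.1
    · have hnot : ¬ x.1 < y.1 := not_lt.mpr hb
      simp only [PySem.List.insertBy, hnot, decide_false, Bool.false_eq_true, if_false]
      rw [List.pairwise_cons]
      refine ⟨?_, ih h.2⟩
      intro z hz
      rcases (PySem.List.mem_insertBy _ _ _ _).mp hz with rfl | hz
      · exact hb
      · exact h.1 z hz
    · have hlt : x.1 < y.1 := not_le.mp hb
      simp only [PySem.List.insertBy, hlt, decide_true, if_true]
      rw [List.pairwise_cons]
      refine ⟨?_, List.pairwise_cons.mpr h⟩
      intro z hz
      rcases List.mem_cons.mp hz with rfl | hz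
      · exact le_of_lt hlt
      · exact le_trans (le_of_lt hlt) (h.1 z hz)

lemma pv_insertBy_filter (c : String) (x : String × String) (ys : List (String × String))
    (h : ys.Pairwise (fun a b => a.1 ≤ b.1)) :
    (PySem.List.insertBy (fun a b => decide (a.1 < b.1)) x ys).filter (fun p => p.1 == c) =
      ys.filter (fun p => p.1 == c) ++ (if x.1 == c then [x] else []) := by
  induction ys with
  | nil => by_cases hc : x.1 = c <;> simp [PySem.List.insertBy, hc]
  | cons y ys ih =>
    rw [List.pairwise_cons] at h
    by_cases hb : y.1 ≤ x.1
    · have hnot : ¬ x.1 < y.1 := not_lt.mpr hb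
      simp only [PySem.List.insertBy, hnot, decide_false, Bool.false_eq_true, if_false]
      rw [List.filter_cons, List.filter_cons, ih h.2]
      by_cases hy : (y.1 == c) = true <;> simp [hy]
    · have hlt : x.1 < y.1 := not_le.mp hb
      simp only [PySem.List.insertBy, hlt, decide_true, if_true]
      rw [List.filter_cons]
      by_cases hc : x.1 = c
      · -- every element of y :: ys has key > x.1 = c, so its filter is empty
        have hemp : (y :: ys).filter (fun p => p.1 == c) = [] := by
          rw [List.filter_eq_nil_iff]
          intro z hz
          have hzk : y.1 ≤ z.1 := by
            rcases List.mem_cons.mp hz with rfl | hz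
            · exact le_refl _
            · exact h.1 z hz
          have : c < z.1 := lt_of_lt_of_le (hc ▸ hlt) hzk
          simp [ne_of_gt this]
        rw [hemp]
        have hxc : (x.1 == c) = true := by simp [hc]
        simp [hxc]
      · have hxc : (x.1 == c) = false := by simp [hc]
        simp [hxc]

lemma pv_foldl_insertBy_filter (c : String) (xs acc : List (String × String))
    (h : acc.Pairwise (fun a b => a.1 ≤ b.1)) :
    ((xs.foldl (fun acc x => PySem.List.insertBy (fun a b => decide (a.1 < b.1)) x acc) acc).filter
        (fun p => p.1 == c)) =
      acc.filter (fun p => p.1 == c) ++ xs.filter (fun p => p.1 == c) := by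
  induction xs generalizing acc with
  | nil => simp
  | cons x xs ih =>
    rw [List.foldl_cons, ih _ (pv_insertBy_pairwise x acc h),
        pv_insertBy_filter c x acc h, List.filter_cons]
    by_cases hc : (x.1 == c) = true <;> simp [hc]

lemma pv_sorted_filter (c : String) (ps : List (String × String)) :
    (PySem.List.sorted ps (fun e => e.1) false).filter (fun p => p.1 == c) =
      ps.filter (fun p => p.1 == c) := by
  rw [PySem.List.sorted_eq_foldl_insertBy, pv_foldl_insertBy_filter c ps [] List.Pairwise.nil]
  simp

-- ---- the distinct keys of a list form a sublist of it ----

lemma pv_foldl_add_sublist {α : Type} [BEq α] (xs s : List α) :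
    (xs.foldl PySem.Set.add s).Sublist (s ++ xs) := by
  induction xs generalizing s with
  | nil => simp
  | cons x xs ih =>
    rw [List.foldl_cons]
    have h1 : (PySem.Set.add s x).Sublist (s ++ [x]) := by
      unfold PySem.Set.add
      split
      · exact List.sublist_append_left s [x]
      · exact List.Sublist.refl _
    have h2 := (ih (PySem.Set.add s x)).trans (h1.append_right xs)
    simpa [List.append_assoc] using h2

lemma pv_ofList_sublist {α : Type} [BEq α] (xs : List α) :
    (PySem.Set.ofList xs).Sublist xs := by
  rw [PySem.Set.ofList_eq_foldl]
  simpa using pv_foldl_add_sublist xs []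

-- ===== VERDICT (by name: the statement is the Claim_ definition above) =====
theorem titulo_por_ano_spec : Claim_equal_titulo_por_ano := by
  intro lista _ hpre
  unfold Spec_titulo_por_ano
  simp only [titulo_por_ano, titulo_por_ano_alt]
  have hA : (lista.foldl (fun res row =>
      match row with
      | nome :: _ :: ano :: _ =>
        if res.contains ano then res.modify ano [] (fun v => v ++ [nome])
        else res.insert ano [nome]
      | _ => res) PySem.Dict.empty) = pvG (lista.map pvToPair) := by
    rw [pvG, List.foldl_map]
    apply PySem.List.foldl_congr_mem
    intro acc row hrow
    have h3 := hpre row hrow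
    rcases row with _ | ⟨nome, _ | ⟨x, _ | ⟨ano, rest⟩⟩⟩
    · simp at h3
    · simp at h3
    · simp at h3
    · simpa [pvToPair, pvStep] using pv_branch_eq_modify acc ano nome
  have hmap : (lista.map (fun row => (row.getD 2 "", row.getD 0 ""))) = lista.map pvToPair := rfl
  rw [hA, hmap]
  set ps := lista.map pvToPair with hps
  set qs := PySem.List.sorted ps (fun e => e.1) false with hqs
  have hGq : (qs.foldl (fun res e => res.modify e.1 [] (fun v => v ++ [e.2]))
      PySem.Dict.empty) = pvG qs := rfl
  rw [hGq, pvG_items, pvG_items]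
  have hFilt : ∀ k : String, (qs.filter (fun p => p.1 == k)).map (fun p => p.2) =
      (ps.filter (fun p => p.1 == k)).map (fun p => p.2) := by
    intro k; rw [hqs, pv_sorted_filter]
  have hitems : pvItems qs = (PySem.Set.ofList (qs.map (fun p => p.1))).map
      (fun k => (k, (ps.filter (fun p => p.1 == k)).map (fun p => p.2))) := by
    unfold pvItems
    exact List.map_congr_left (fun k _ => by rw [hFilt k])
  rw [hitems]
  apply PySem.List.sorted_eq_of_perm_of_pairwise_lt
  · -- permutation: same distinct keys, mapped through the same grouping function
    apply List.Perm.map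
    apply (List.perm_ext_iff_of_nodup (PySem.Set.nodup_ofList _) (PySem.Set.nodup_ofList _)).mpr
    intro k
    simp only [PySem.Set.mem_ofList, List.mem_map]
    constructor
    · rintro ⟨p, hp, rfl⟩
      exact ⟨p, (PySem.List.mem_sorted _ _ _ _).mp hp, rfl⟩
    · rintro ⟨p, hp, rfl⟩
      exact ⟨p, (PySem.List.mem_sorted _ _ _ _).mpr hp, rfl⟩
  · -- strictly increasing keys
    rw [List.pairwise_map]
    have hle : (qs.map (fun p => p.1)).Pairwise (fun a b => a ≤ b) := by
      rw [List.pairwise_map]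
      exact PySem.List.sorted_pairwise ps (fun e => e.1)
    have hle' := hle.sublist (pv_ofList_sublist (qs.map (fun p => p.1)))
    have hnd : (PySem.Set.ofList (qs.map (fun p => p.1))).Nodup :=
      PySem.Set.nodup_ofList _
    exact (hle'.and hnd).imp (fun h => lt_of_le_of_ne h.1 h.2)
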